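-- pv_equiv track=rewrite | github.com/bigfrog10/python-data-structure-algo-tutorial | src/companies/facebook/recruiting_portal/4_strings/matching_pairs.py | matching_pairs
-- ===== SOURCE A (Python) =====
-- from collections import defaultdict
--
-- def matching_pairs(s, t):
--     cnt = 0 # count equal chars
--     for i, c in enumerate(s):
--         if i < len(t) and t[i] == s[i]:
--             cnt += 1
--     # swap, this will change cnt by +/- 2
--     t_idx = defaultdict(set)  # t's char to indices
--     for i, c in enumerate(t):
--         t_idx[c].add(i)
--
--     for i, c in enumerate(s):
--         if i < len(t) and t[i] == s[i]: continue
--         c_idxs = t_idx[c]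
--         for ci in c_idxs:
--             if ci < len(s) and i in t_idx[s[ci]]:
--                 return cnt + 2
--     return cnt - 2
-- ===== SOURCE B (Python) =====
-- def matching_pairs(s, t):
--     pairs = list(zip(s, t))
--     cnt = sum(a == b for a, b in pairs)
--     mism = {p for p in pairs if p[0] != p[1]}
--     return cnt + 2 if any((b, a) in mism for a, b in mism) else cnt - 2
-- ===== Notes on version B (the rewrite author's own statement) =====
-- stated objective: faster
-- what changed: B replaces A's per-mismatch scan over a char-to-indices defaultdict (quadratic in the worst case) by a single set of mismatching (s[i],t[i]) pairs queried once for the reversed pair (b,a).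
import Mathlib
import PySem

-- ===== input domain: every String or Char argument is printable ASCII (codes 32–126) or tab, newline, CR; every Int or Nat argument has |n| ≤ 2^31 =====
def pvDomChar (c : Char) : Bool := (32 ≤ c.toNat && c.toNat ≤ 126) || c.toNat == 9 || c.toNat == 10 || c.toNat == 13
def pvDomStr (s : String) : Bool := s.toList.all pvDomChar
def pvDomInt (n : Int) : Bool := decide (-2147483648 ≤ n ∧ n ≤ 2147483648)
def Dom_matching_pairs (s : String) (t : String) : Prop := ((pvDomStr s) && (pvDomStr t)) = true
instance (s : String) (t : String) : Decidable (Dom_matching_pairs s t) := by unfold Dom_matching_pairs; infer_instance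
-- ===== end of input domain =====

-- B replaces A's quadratic mismatch-vs-index-set scan by one set of mismatch (s[i],t[i]) pairs
-- looked up for the swapped complement: O(n) instead of O(n^2), identical return value.

-- ===== PORT A =====
-- 'i < len(t) and t[i] == s[i]' for p = (i, c) drawn from enumerate(s)
def mpSkip (st tt : List Char) (p : Int × Char) : Bool :=
  decide (p.1 < (tt.length : Int)) && (PySem.List.pyGet? tt p.1 == PySem.List.pyGet? st p.1)

-- t_idx = defaultdict(set); for i, c in enumerate(t): t_idx[c].add(i)
def mpTIdx (tt : List Char) : PySem.Dict Char (PySem.Set Int) :=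
  (PySem.List.enumerate tt).foldl
    (fun d p => d.modify p.2 PySem.Set.empty (fun cs => cs.add p.1)) PySem.Dict.empty

def matching_pairs (s : String) (t : String) : Int :=
  let st := s.toList
  let tt := t.toList
  -- cnt = 0; for i, c in enumerate(s): if i < len(t) and t[i] == s[i]: cnt += 1
  let cnt : Int := (PySem.List.enumerate st).foldl (fun acc p => if mpSkip st tt p then acc + 1 else acc) 0
  let tIdx := mpTIdx tt
  -- the early 'return cnt + 2' always returns the same value, so the search is an 'any';
  -- iteration order over the Python set c_idxs cannot influence the result.
  -- 's[ci]' is guarded by 'ci < len(s)' (short-circuit), so pyGetD's default is never read.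
  if (PySem.List.enumerate st).any (fun p =>
       !(mpSkip st tt p) &&
       (tIdx.getD p.2 PySem.Set.empty).any (fun ci =>
         decide (ci < (st.length : Int)) &&
         PySem.Set.contains (tIdx.getD (PySem.List.pyGetD st ci ' ') PySem.Set.empty) p.1))
  then cnt + 2 else cnt - 2

-- ===== PORT B =====
def matching_pairs_alt (s : String) (t : String) : Int :=
  let pairs := s.toList.zip t.toList
  let cnt : Int := (pairs.countP (fun p => p.1 == p.2) : Nat)
  let mism : PySem.Set (Char × Char) := PySem.Set.ofList (pairs.filter (fun p => !(p.1 == p.2)))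
  if mism.any (fun p => PySem.Set.contains mism (p.2, p.1)) then cnt + 2 else cnt - 2

-- ===== PRECONDITION & SPEC =====
def Spec_matching_pairs (s : String) (t : String) (out : Int) : Prop := out = matching_pairs_alt s t
instance (s : String) (t : String) (out : Int) : Decidable (Spec_matching_pairs s t out) := by unfold Spec_matching_pairs; infer_instance

-- ===== CLAIM (what is proved, stated in full; the proofs are below) =====
def Claim_equal_matching_pairs : Prop := ∀ (s : String) (t : String), Dom_matching_pairs s t → Spec_matching_pairs s t (matching_pairs s t)

-- ===== LEMMAS AND PROOFS =====

lemma enumerate_shift {α : Type} (xs : List α) (k : Int) :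
    PySem.List.enumerate xs (k + 1) = (PySem.List.enumerate xs k).map (fun p => (p.1 + 1, p.2)) := by
  induction xs generalizing k with
  | nil => simp [PySem.List.enumerate_nil]
  | cons x xs ih => simp [PySem.List.enumerate_cons, ih (k + 1)]

lemma cnt_eq : ∀ (st tt : List Char),
    (PySem.List.enumerate st).countP (mpSkip st tt) = (st.zip tt).countP (fun p => p.1 == p.2) := by
  intro st
  induction st with
  | nil => intro tt; simp [PySem.List.enumerate_nil]
  | cons c st' ih =>
    intro tt
    cases tt with
    | nil =>
      simp only [List.zip_nil_right, List.countP_nil]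
      rw [List.countP_eq_zero]
      intro p hp
      rw [PySem.List.mem_enumerate_iff] at hp
      obtain ⟨k, hk, rfl⟩ := hp
      simp [mpSkip]
    | cons d tt' =>
      rw [PySem.List.enumerate_cons, List.countP_cons, List.zip_cons_cons, List.countP_cons,
          enumerate_shift, List.countP_map]
      have hcongr : List.countP (mpSkip (c :: st') (d :: tt') ∘ fun p => (p.1 + 1, p.2))
            (PySem.List.enumerate st')
          = List.countP (mpSkip st' tt') (PySem.List.enumerate st') := by
        apply List.countP_congr
        intro p hp
        rw [PySem.List.mem_enumerate_iff] at hp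
        obtain ⟨k, hk, rfl⟩ := hp
        simp only [Function.comp, mpSkip, zero_add]
        have e1 : ((k : Int) + 1) = ((k + 1 : Nat) : Int) := by push_cast; ring
        rw [e1, PySem.List.pyGet?_natCast, PySem.List.pyGet?_natCast, PySem.List.pyGet?_natCast,
            PySem.List.pyGet?_natCast]
        simp only [List.getElem?_cons_succ, List.length_cons, Bool.and_eq_true, decide_eq_true_eq]
        constructor <;> rintro ⟨h1, h2⟩ <;> exact ⟨by push_cast at h1 ⊢; omega, h2⟩
      rw [hcongr, ih tt']
      have hhead : mpSkip (c :: st') (d :: tt') (0, c) = ((c, d).1 == (c, d).2) := by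
        simp only [mpSkip]
        have h0 : PySem.List.pyGet? (d :: tt') ((0 : Nat) : Int) = some d := by
          rw [PySem.List.pyGet?_natCast]; rfl
        have h1 : PySem.List.pyGet? (c :: st') ((0 : Nat) : Int) = some c := by
          rw [PySem.List.pyGet?_natCast]; rfl
        push_cast at h0 h1
        rw [h0, h1]
        rw [Bool.eq_iff_iff]
        simp only [Bool.and_eq_true, decide_eq_true_eq, beq_iff_eq, Option.some.injEq,
          List.length_cons]
        constructor
        · rintro ⟨-, h⟩; exact h.symm
        · intro h; exact ⟨by push_cast; omega, h.symm⟩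
      rw [hhead]

lemma tidx_foldl_mem : ∀ (ps : List (Int × Char)) (d : PySem.Dict Char (PySem.Set Int)) (c : Char) (j : Int),
    (j ∈ (ps.foldl (fun d p => d.modify p.2 PySem.Set.empty (fun cs => cs.add p.1)) d).getD c PySem.Set.empty)
    ↔ (j ∈ d.getD c PySem.Set.empty ∨ ∃ p ∈ ps, p.2 = c ∧ p.1 = j) := by
  intro ps
  induction ps with
  | nil => intro d c j; simp
  | cons q ps ih =>
    intro d c j
    rw [List.foldl_cons, ih]
    rw [PySem.Dict.getD_modify]
    by_cases h : c = q.2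
    · rw [if_pos h]
      subst h
      rw [PySem.Set.mem_add]
      constructor
      · rintro (⟨hm | rfl⟩ | ⟨p, hp, h2, h1⟩)
        · exact Or.inl hm
        · exact Or.inr ⟨q, List.mem_cons_self .., rfl, rfl⟩
        · exact Or.inr ⟨p, List.mem_cons_of_mem _ hp, h2, h1⟩
      · rintro (hm | ⟨p, hp, h2, h1⟩)
        · exact Or.inl (Or.inl hm)
        · rcases List.mem_cons.mp hp with rfl | hp'
          · exact Or.inl (Or.inr h1.symm)
          · exact Or.inr ⟨p, hp', h2, h1⟩
    · rw [if_neg h]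
      constructor
      · rintro (hm | ⟨p, hp, h2, h1⟩)
        · exact Or.inl hm
        · exact Or.inr ⟨p, List.mem_cons_of_mem _ hp, h2, h1⟩
      · rintro (hm | ⟨p, hp, h2, h1⟩)
        · exact Or.inl hm
        · rcases List.mem_cons.mp hp with rfl | hp'
          · exact absurd h2.symm h
          · exact Or.inr ⟨p, hp', h2, h1⟩

lemma tidx_mem (tt : List Char) (c : Char) (j : Int) :
    (j ∈ (mpTIdx tt).getD c PySem.Set.empty) ↔ ∃ (k : Nat) (_ : k < tt.length), j = (k : Int) ∧ tt[k] = c := by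
  unfold mpTIdx
  rw [tidx_foldl_mem]
  simp only [PySem.Dict.getD_empty]
  constructor
  · rintro (hm | ⟨p, hp, h2, h1⟩)
    · simp [PySem.Set.empty] at hm
    · rw [PySem.List.mem_enumerate_iff] at hp
      obtain ⟨k, hk, rfl⟩ := hp
      exact ⟨k, hk, by simpa using h1.symm, h2⟩
  · rintro ⟨k, hk, rfl, hc⟩
    refine Or.inr ⟨((k : Int), tt[k]), ?_, hc, rfl⟩
    rw [PySem.List.mem_enumerate_iff]
    exact ⟨k, hk, by simp⟩

-- membership in B's mismatch set
lemma mism_mem (st tt : List Char) (q : Char × Char) :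
    q ∈ PySem.Set.ofList ((st.zip tt).filter (fun p => !(p.1 == p.2)))
    ↔ ∃ (k : Nat) (_ : k < st.length) (_ : k < tt.length), st[k] = q.1 ∧ tt[k] = q.2 ∧ q.1 ≠ q.2 := by
  rw [PySem.Set.mem_ofList, List.mem_filter]
  constructor
  · rintro ⟨hz, hne⟩
    obtain ⟨k, hk, hget⟩ := List.mem_iff_getElem.mp hz
    rw [List.getElem_zip] at hget
    rw [List.length_zip] at hk
    refine ⟨k, by omega, by omega, ?_, ?_, ?_⟩
    · rw [← hget]
    · rw [← hget]
    · simpa using hne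
  · rintro ⟨k, hk1, hk2, h1, h2, hne⟩
    have hk : k < (st.zip tt).length := by rw [List.length_zip]; omega
    have : (st.zip tt)[k] = q := by rw [List.getElem_zip, h1, h2]
    refine ⟨this ▸ List.getElem_mem hk, by simpa using hne⟩

-- skip condition at an in-range index
lemma mpSkip_cast (st tt : List Char) (k : Nat) (hk : k < st.length) :
    mpSkip st tt ((k : Int), st[k]) = (decide (k < tt.length) && (tt[k]? == st[k]?)) := by
  simp only [mpSkip, PySem.List.pyGet?_natCast]
  congr 1
  rw [decide_eq_decide]; omega

lemma search_iff (st tt : List Char) :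
    ((PySem.List.enumerate st).any (fun p =>
       !(mpSkip st tt p) &&
       ((mpTIdx tt).getD p.2 PySem.Set.empty).any (fun ci =>
         decide (ci < (st.length : Int)) &&
         PySem.Set.contains ((mpTIdx tt).getD (PySem.List.pyGetD st ci ' ') PySem.Set.empty) p.1)) = true)
    ↔ ((PySem.Set.ofList ((st.zip tt).filter (fun p => !(p.1 == p.2)))).any
        (fun p => PySem.Set.contains (PySem.Set.ofList ((st.zip tt).filter (fun p => !(p.1 == p.2)))) (p.2, p.1)) = true) := by
  rw [List.any_eq_true, List.any_eq_true]
  constructor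
  · rintro ⟨p, hp, hcond⟩
    rw [PySem.List.mem_enumerate_iff] at hp
    obtain ⟨k, hk, rfl⟩ := hp
    simp only [zero_add, Bool.and_eq_true, Bool.not_eq_true'] at hcond
    obtain ⟨hskip, hinner⟩ := hcond
    rw [List.any_eq_true] at hinner
    obtain ⟨ci, hci, hcit⟩ := hinner
    rw [tidx_mem] at hci
    obtain ⟨m, hm, rfl, htm⟩ := hci
    rw [Bool.and_eq_true, decide_eq_true_eq] at hcit
    obtain ⟨hms, hcont⟩ := hcit
    have hms' : m < st.length := by exact_mod_cast hms
    rw [PySem.List.pyGetD_natCast, List.getD_eq_getElem?_getD, List.getElem?_eq_getElem hms'] at hcont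
    simp only [Option.getD_some] at hcont
    rw [PySem.Set.contains_iff, tidx_mem] at hcont
    obtain ⟨k', hk', hkk', htk⟩ := hcont
    have hkeq : k = k' := by exact_mod_cast hkk'
    subst hkeq
    -- k < tt.length and tt[k] = st[m]; skip was false so tt[k] ≠ st[k]
    rw [mpSkip_cast st tt k hk] at hskip
    rw [Bool.and_eq_false_iff] at hskip
    have hne : st[k] ≠ tt[k] := by
      rcases hskip with h | h
      · simp at h; omega
      · rw [List.getElem?_eq_getElem hk', List.getElem?_eq_getElem hk] at h
        intro hcontra; simp [hcontra] at h
    refine ⟨(st[k], tt[k]), ?_, ?_⟩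
    · rw [mism_mem]; exact ⟨k, hk, hk', rfl, rfl, hne⟩
    · rw [PySem.Set.contains_iff, mism_mem]
      exact ⟨m, hms', hm, htk.symm, htm, fun h => hne h.symm⟩
  · rintro ⟨q, hq, hcont⟩
    rw [mism_mem] at hq
    obtain ⟨k, hk1, hk2, hs, ht, hne⟩ := hq
    rw [PySem.Set.contains_iff, mism_mem] at hcont
    obtain ⟨m, hm1, hm2, hms, hmt, _⟩ := hcont
    refine ⟨((k : Int), st[k]), ?_, ?_⟩
    · rw [PySem.List.mem_enumerate_iff]; exact ⟨k, hk1, by simp⟩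
    · simp only [Bool.and_eq_true, Bool.not_eq_true']
      refine ⟨?_, ?_⟩
      · rw [mpSkip_cast st tt k hk1, Bool.and_eq_false_iff]
        right
        rw [List.getElem?_eq_getElem hk2, List.getElem?_eq_getElem hk1]
        simp only [Option.some.injEq, beq_eq_false_iff_ne, ne_eq]
        rw [hs, ht]; exact fun h => hne h.symm
      · rw [List.any_eq_true]
        refine ⟨(m : Int), ?_, ?_⟩
        · rw [tidx_mem]
          exact ⟨m, hm2, rfl, by rw [hmt, hs]⟩
        · rw [Bool.and_eq_true, decide_eq_true_eq]
          refine ⟨by exact_mod_cast hm1, ?_⟩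
          rw [PySem.List.pyGetD_natCast, List.getD_eq_getElem?_getD, List.getElem?_eq_getElem hm1]
          simp only [Option.getD_some]
          rw [PySem.Set.contains_iff, tidx_mem]
          exact ⟨k, hk2, rfl, by rw [ht, hms]⟩

-- ===== VERDICT (by name: the statement is the Claim_ definition above) =====
theorem matching_pairs_spec : Claim_equal_matching_pairs := by
  intro s t _
  unfold Spec_matching_pairs matching_pairs matching_pairs_alt
  simp only
  rw [PySem.List.foldl_if_add_one, cnt_eq]
  have hcond := search_iff s.toList t.toList
  rw [Bool.eq_iff_iff.mpr hcond]
  split <;> ring
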